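-- pv_equiv track=rewrite | github.com/AlisherXujanov/PythonCourse | Online-lesson/9-built-ins/amirbek_hw.py | change_last_vowel_to_dash
-- ===== SOURCE A (Python) =====
-- def change_last_vowel_to_dash(text):
--     vowels = 'aouie'
--     last_vowel = ''
--     # We must find the last vowel in the text
--     # RU: Мы должны найти последнюю гласную в тексте
--     for i in text[::-1]:
--         if i in vowels:
--             last_vowel = i
--             break
--
--     idx_of_last_vowel = text.rfind(last_vowel)
--     return text[0:idx_of_last_vowel] + '-' + text[idx_of_last_vowel + 1:]
-- ===== SOURCE B (Python) =====
-- def change_last_vowel_to_dash(text):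
--     # One forward pass: remember the position of the most recent vowel seen;
--     # if none, idx stays len(text), so the dash lands after the text.
--     idx = len(text)
--     for i, ch in enumerate(text):
--         if ch in 'aouie':
--             idx = i
--     return text[:idx] + '-' + text[idx + 1:]
-- ===== Notes on version B (the rewrite author's own statement) =====
-- stated objective: simpler
-- what changed: A scans the reversed string for the last vowel character and then rescans with rfind to locate its index; B makes one forward pass over enumerate(text), overwriting the index at each vowel so the last one wins, then slices once.
import Mathlib
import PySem

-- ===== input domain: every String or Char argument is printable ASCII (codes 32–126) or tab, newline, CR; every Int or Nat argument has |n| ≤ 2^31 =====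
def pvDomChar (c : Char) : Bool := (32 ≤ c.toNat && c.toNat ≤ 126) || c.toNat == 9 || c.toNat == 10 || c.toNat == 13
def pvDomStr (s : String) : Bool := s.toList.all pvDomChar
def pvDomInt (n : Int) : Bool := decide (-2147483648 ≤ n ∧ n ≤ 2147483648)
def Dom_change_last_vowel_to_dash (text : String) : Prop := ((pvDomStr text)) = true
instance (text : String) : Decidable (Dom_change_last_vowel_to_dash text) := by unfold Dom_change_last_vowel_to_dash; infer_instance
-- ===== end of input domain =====

-- B replaces A's reverse scan for the last vowel character plus rfind rescan by a
-- single forward pass that keeps overwriting the index of the latest vowel (simpler).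

-- ===== PORT A =====
-- vowels = 'aouie'
def pvVowels : List Char := "aouie".toList
-- 'i in vowels' (a single character tested for membership in the vowel string)
def pvIsVowel (c : Char) : Bool := PySem.Chars.isIn [c] pvVowels

-- the for-loop over text[::-1] with break: returns '' ([]) or the first vowel met ([c])
def pvLastVowelLoop : List Char → List Char
  | [] => []
  | c :: rest => if pvIsVowel c then [c] else pvLastVowelLoop rest

def change_last_vowel_to_dash (text : String) : String :=
  let l := text.toList
  -- text[::-1] is l.reverse (PySem.Chars.slice?_none_none_neg_one)
  let last_vowel := pvLastVowelLoop l.reverse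
  let idx := PySem.Chars.rfind l last_vowel
  String.ofList (PySem.Chars.slice l (some 0) (some idx) ++ ['-'] ++
                 PySem.Chars.slice l (some (idx + 1)) none)

-- ===== PORT B =====
def change_last_vowel_to_dash_alt (text : String) : String :=
  let l := text.toList
  let idx := (PySem.List.enumerate l 0).foldl
      (fun acc p => if pvIsVowel p.2 then p.1 else acc) (l.length : Int)
  String.ofList (PySem.Chars.slice l none (some idx) ++ ['-'] ++
                 PySem.Chars.slice l (some (idx + 1)) none)

-- ===== PRECONDITION & SPEC =====
def Spec_change_last_vowel_to_dash (text : String) (out : String) : Prop := out = change_last_vowel_to_dash_alt text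
instance (text : String) (out : String) : Decidable (Spec_change_last_vowel_to_dash text out) := by unfold Spec_change_last_vowel_to_dash; infer_instance

-- ===== CLAIM (what is proved, stated in full; the proofs are below) =====
def Claim_equal_change_last_vowel_to_dash : Prop := ∀ (text : String), Dom_change_last_vowel_to_dash text → Spec_change_last_vowel_to_dash text (change_last_vowel_to_dash text)

-- ===== LEMMAS AND PROOFS =====

-- index of the LAST vowel of l, if any
def pvLvi : List Char → Option Nat
  | [] => none
  | c :: rest =>
    match pvLvi rest with
    | some j => some (j + 1)
    | none => if pvIsVowel c then some 0 else none

theorem pv_fold_eq (l : List Char) (k a : Int) :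
    (PySem.List.enumerate l k).foldl (fun acc p => if pvIsVowel p.2 then p.1 else acc) a
      = match pvLvi l with
        | none => a
        | some j => k + (j : Int) := by
  induction l generalizing k a with
  | nil => simp [PySem.List.enumerate_nil, pvLvi]
  | cons c rest ih =>
    rw [PySem.List.enumerate_cons, List.foldl_cons, ih]
    cases h : pvLvi rest with
    | none =>
      by_cases hv : pvIsVowel c = true
      · simp [pvLvi, h, hv]
      · simp [pvLvi, h, hv]
    | some j =>
      simp only [pvLvi, h]
      push_cast
      ring

theorem pv_nil_isPrefixOf (t : List Char) : List.isPrefixOf ([] : List Char) t = true := rfl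

theorem pv_singleton_isPrefixOf (c : Char) (xs : List Char) :
    [c].isPrefixOf xs = true ↔ xs.head? = some c := by
  cases xs with
  | nil =>
    show false = true ↔ ([] : List Char).head? = some c
    simp
  | cons x t =>
    show (c == x && List.isPrefixOf ([] : List Char) t) = true ↔ (x :: t).head? = some c
    rw [pv_nil_isPrefixOf, Bool.and_true, beq_iff_eq, List.head?_cons, Option.some_inj]
    exact eq_comm

theorem pv_go_zero (s sub : List Char) :
    PySem.Chars.rfind.go s sub 0 = if sub.isPrefixOf s then 0 else -1 := rfl

theorem pv_go_succ (s sub : List Char) (j : Nat) :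
    PySem.Chars.rfind.go s sub (j + 1)
      = if sub.isPrefixOf (List.drop (j + 1) s) then ((j + 1 : Nat) : Int)
        else PySem.Chars.rfind.go s sub j := rfl

theorem pv_go_nil (s : List Char) (n : Nat) : PySem.Chars.rfind.go s [] n = n := by
  cases n with
  | zero => rw [pv_go_zero, pv_nil_isPrefixOf]; simp
  | succ m => rw [pv_go_succ, pv_nil_isPrefixOf]; simp

theorem pv_go_eq (s sub : List Char) (j : Nat)
    (hj : sub.isPrefixOf (List.drop j s) = true)
    (hup : ∀ i : Nat, j < i → sub.isPrefixOf (List.drop i s) = false) :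
    ∀ n : Nat, j ≤ n → PySem.Chars.rfind.go s sub n = j := by
  intro n
  induction n with
  | zero =>
    intro h
    have hj0 : j = 0 := by omega
    subst hj0
    simp only [List.drop_zero] at hj
    simp [pv_go_zero, hj]
  | succ m ih =>
    intro h
    rw [pv_go_succ]
    by_cases hje : j = m + 1
    · subst hje; simp [hj]
    · rw [hup (m + 1) (by omega)]
      simp only [Bool.false_eq_true, if_false]
      exact ih (by omega)

theorem pv_lvi_none (l : List Char) (h : pvLvi l = none) :
    ∀ (i : Nat) (c : Char), l[i]? = some c → pvIsVowel c = false := by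
  induction l with
  | nil => intro i c hc; simp at hc
  | cons x rest ih =>
    intro i c hc
    have hr : pvLvi rest = none := by
      unfold pvLvi at h
      cases hh : pvLvi rest with
      | none => rfl
      | some j => rw [hh] at h; simp at h
    have hx : pvIsVowel x = false := by
      unfold pvLvi at h
      rw [hr] at h
      by_cases hv : pvIsVowel x = true
      · rw [hv] at h; simp at h
      · simpa using hv
    cases i with
    | zero => simp at hc; subst hc; exact hx
    | succ i' => exact ih hr i' c (by simpa using hc)

theorem pv_lvi_some (l : List Char) (j : Nat) (h : pvLvi l = some j) :
    ∃ c, l[j]? = some c ∧ pvIsVowel c = true ∧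
      ∀ (i : Nat), j < i → ∀ c', l[i]? = some c' → pvIsVowel c' = false := by
  induction l generalizing j with
  | nil => simp [pvLvi] at h
  | cons x rest ih =>
    unfold pvLvi at h
    cases hr : pvLvi rest with
    | some j' =>
      rw [hr] at h
      simp only [Option.some.injEq] at h
      subst h
      obtain ⟨c, hc, hv, hup⟩ := ih j' hr
      refine ⟨c, by simpa using hc, hv, ?_⟩
      intro i hi c' hc'
      cases i with
      | zero => omega
      | succ i' => exact hup i' (by omega) c' (by simpa using hc')
    | none =>
      rw [hr] at h
      by_cases hv : pvIsVowel x = true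
      · rw [if_pos hv] at h
        simp only [Option.some.injEq] at h
        subst h
        refine ⟨x, by simp, hv, ?_⟩
        intro i hi c' hc'
        cases i with
        | zero => omega
        | succ i' => exact pv_lvi_none rest hr i' c' (by simpa using hc')
      · rw [if_neg hv] at h; simp at h

theorem pv_lvi_append (xs : List Char) (c : Char) :
    pvLvi (xs ++ [c]) = if pvIsVowel c then some xs.length else pvLvi xs := by
  induction xs with
  | nil => simp [pvLvi]
  | cons x rest ih =>
    by_cases hv : pvIsVowel c = true
    · show (match pvLvi (rest ++ [c]) with
            | some j => some (j + 1)
            | none => if pvIsVowel x then some 0 else none)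
          = if pvIsVowel c then some (x :: rest).length else pvLvi (x :: rest)
      rw [ih, if_pos hv, if_pos hv]
      simp
    · show (match pvLvi (rest ++ [c]) with
            | some j => some (j + 1)
            | none => if pvIsVowel x then some 0 else none)
          = if pvIsVowel c then some (x :: rest).length else pvLvi (x :: rest)
      rw [ih, if_neg hv, if_neg hv]
      rfl

theorem pv_loop_none (l : List Char) (h : pvLvi l = none) :
    pvLastVowelLoop l.reverse = [] := by
  induction l using List.reverseRecOn with
  | nil => simp [pvLastVowelLoop]
  | append_singleton xs c ih =>
    rw [pv_lvi_append] at h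
    by_cases hv : pvIsVowel c = true
    · rw [if_pos hv] at h; simp at h
    · rw [if_neg hv] at h
      simp only [Bool.not_eq_true] at hv
      rw [List.reverse_append]
      simp [pvLastVowelLoop, hv, ih h]

theorem pv_loop_some (l : List Char) (j : Nat) (h : pvLvi l = some j) :
    ∀ c, l[j]? = some c → pvLastVowelLoop l.reverse = [c] := by
  induction l using List.reverseRecOn generalizing j with
  | nil => simp [pvLvi] at h
  | append_singleton xs d ih =>
    rw [pv_lvi_append] at h
    intro c hc
    by_cases hv : pvIsVowel d = true
    · rw [if_pos hv] at h
      simp only [Option.some.injEq] at h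
      subst h
      have hd : c = d := by
        rw [List.getElem?_append_right (le_refl xs.length)] at hc
        simp at hc
        exact hc.symm
      subst hd
      rw [List.reverse_append]
      simp [pvLastVowelLoop, hv]
    · rw [if_neg hv] at h
      simp only [Bool.not_eq_true] at hv
      obtain ⟨c0, hc0, _, _⟩ := pv_lvi_some xs j h
      have hjlt : j < xs.length := by
        have := List.getElem?_eq_some_iff.mp hc0
        exact this.1
      have hc' : xs[j]? = some c := by
        rw [List.getElem?_append_left hjlt] at hc
        exact hc
      rw [List.reverse_append]
      simp [pvLastVowelLoop, hv, ih j h c hc']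

theorem pv_key (l : List Char) :
    PySem.Chars.rfind l (pvLastVowelLoop l.reverse)
      = (PySem.List.enumerate l 0).foldl
          (fun acc p => if pvIsVowel p.2 then p.1 else acc) (l.length : Int) := by
  rw [pv_fold_eq]
  cases h : pvLvi l with
  | none =>
    rw [pv_loop_none l h]
    simp [PySem.Chars.rfind, pv_go_nil]
  | some j =>
    obtain ⟨c, hc, hv, hup⟩ := pv_lvi_some l j h
    rw [pv_loop_some l j h c hc]
    have hjlt : j < l.length := (List.getElem?_eq_some_iff.mp hc).1
    have hj' : [c].isPrefixOf (List.drop j l) = true := by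
      rw [pv_singleton_isPrefixOf, List.head?_drop]
      exact hc
    have hupP : ∀ i : Nat, j < i → [c].isPrefixOf (List.drop i l) = false := by
      intro i hi
      cases hbb : [c].isPrefixOf (List.drop i l) with
      | false => rfl
      | true =>
        exfalso
        rw [pv_singleton_isPrefixOf, List.head?_drop] at hbb
        have := hup i hi c hbb
        rw [hv] at this
        exact absurd this (by simp)
    unfold PySem.Chars.rfind
    rw [pv_go_eq l [c] j hj' hupP l.length (by omega)]
    simp

-- ===== VERDICT (by name: the statement is the Claim_ definition above) =====
theorem change_last_vowel_to_dash_spec : Claim_equal_change_last_vowel_to_dash := by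
  intro text _
  unfold Spec_change_last_vowel_to_dash change_last_vowel_to_dash change_last_vowel_to_dash_alt
  simp only [PySem.Chars.slice_eq_listSlice, PySem.List.slice_zero_start, pv_key]
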